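-- pv_equiv track=rewrite | github.com/AdityaVed95/InformationSecuritySem6 | Labs/Lab1_encryption_decryption_ciphers/playfair_cipher.py | get_encrypted_or_decrypted_letters_neither_same_row_nor_column
-- ===== SOURCE A (Python) =====
-- def get_encrypted_or_decrypted_letters_neither_same_row_nor_column(secret_key_matrix,letter1,letter2):
--     encrypted_letter1 = None
--     encrypted_letter2 = None
--     column_of_letter1 = None
--     column_of_letter2 = None
--
--     for i in range(5):
--         for j in range(5):
--             if(secret_key_matrix[i][j] == letter1):
--                 column_of_letter1 = j
--
--             elif(secret_key_matrix[i][j] == letter2):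
--                 column_of_letter2 = j
--
--     for i in range(5):
--         for j in range(5):
--             if(secret_key_matrix[i][j] == letter1):
--                 encrypted_letter1 = secret_key_matrix[i][column_of_letter2]
--
--             elif(secret_key_matrix[i][j] == letter2):
--                 encrypted_letter2 = secret_key_matrix[i][column_of_letter1]
--
--     return encrypted_letter1,encrypted_letter2
-- ===== SOURCE B (Python) =====
-- def get_encrypted_or_decrypted_letters_neither_same_row_nor_column(secret_key_matrix, letter1, letter2):
--     pos1 = None
--     pos2 = None
--     for i in range(5):
--         row = secret_key_matrix[i]
--         for j in range(5):
--             v = row[j]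
--             if v == letter1:
--                 pos1 = (i, j)
--             elif v == letter2:
--                 pos2 = (i, j)
--     return (secret_key_matrix[pos1[0]][pos2[1]],
--             secret_key_matrix[pos2[0]][pos1[1]])
-- ===== Notes on version B (the rewrite author's own statement) =====
-- stated objective: simpler
-- what changed: B replaces A's two full 5x5 passes by a single scan that records the full (row,col) position of each letter (last occurrence wins, like A's elif chain) and then reads the two rectangle corners directly from the recorded positions.
import Mathlib
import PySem

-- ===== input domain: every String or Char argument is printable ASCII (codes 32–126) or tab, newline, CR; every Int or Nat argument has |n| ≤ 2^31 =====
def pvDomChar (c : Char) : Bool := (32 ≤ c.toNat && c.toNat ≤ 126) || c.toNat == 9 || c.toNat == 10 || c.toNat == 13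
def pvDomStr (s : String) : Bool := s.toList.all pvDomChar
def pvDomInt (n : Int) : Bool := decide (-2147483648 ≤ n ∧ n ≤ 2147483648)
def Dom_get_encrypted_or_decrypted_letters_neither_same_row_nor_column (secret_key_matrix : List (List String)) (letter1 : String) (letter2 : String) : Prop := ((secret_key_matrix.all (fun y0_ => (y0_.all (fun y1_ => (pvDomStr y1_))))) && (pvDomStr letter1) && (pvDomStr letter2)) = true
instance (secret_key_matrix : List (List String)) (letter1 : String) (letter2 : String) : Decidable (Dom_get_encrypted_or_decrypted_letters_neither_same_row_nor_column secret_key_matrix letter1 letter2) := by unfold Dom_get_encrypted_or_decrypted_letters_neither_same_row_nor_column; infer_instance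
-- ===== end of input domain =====

-- B replaces A's two 5x5 passes by one scan recording each letter's full (row,col)
-- position (last occurrence wins, as in A) and reads the rectangle corners from it;
-- objective: simpler. Equivalence is on the return value, on Pre_ below.

-- ===== PORT A =====
-- secret_key_matrix[i][j]  (none = IndexError, which Pre_ excludes)
def pvCellA (m : List (List String)) (i j : Int) : Option String :=
  (PySem.List.pyGet? m i).bind (fun row => PySem.List.pyGet? row j)

def get_encrypted_or_decrypted_letters_neither_same_row_nor_column (secret_key_matrix : List (List String)) (letter1 : String) (letter2 : String) : String × String :=
  -- first double loop: column_of_letter1 / column_of_letter2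
  let cols : Option Int × Option Int :=
    (PySem.List.pyRange 0 5 1).foldl (fun c i =>
      (PySem.List.pyRange 0 5 1).foldl (fun c j =>
        match pvCellA secret_key_matrix i j with
        | some v =>
          if v = letter1 then (some j, c.2)
          else if v = letter2 then (c.1, some j)
          else c
        | none => c) c) (none, none)
  -- second double loop: encrypted_letter1 / encrypted_letter2
  let encs : Option String × Option String :=
    (PySem.List.pyRange 0 5 1).foldl (fun e i =>
      (PySem.List.pyRange 0 5 1).foldl (fun e j =>
        match pvCellA secret_key_matrix i j with
        | some v =>
          if v = letter1 then (cols.2.bind (fun c => pvCellA secret_key_matrix i c), e.2)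
          else if v = letter2 then (e.1, cols.1.bind (fun c => pvCellA secret_key_matrix i c))
          else e
        | none => e) e) (none, none)
  -- Python returns the two (possibly None) values; None / raising cases are outside Pre_
  (encs.1.getD "", encs.2.getD "")

-- ===== PORT B =====
-- row = secret_key_matrix[i]; v = row[j]  (none = IndexError, outside Pre_)
def pvCellB (m : List (List String)) (i j : Int) : Option String :=
  (PySem.List.pyGet? m i).bind (fun row => PySem.List.pyGet? row j)

def get_encrypted_or_decrypted_letters_neither_same_row_nor_column_alt (secret_key_matrix : List (List String)) (letter1 : String) (letter2 : String) : String × String :=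
  let ps : Option (Int × Int) × Option (Int × Int) :=
    (PySem.List.pyRange 0 5 1).foldl (fun p i =>
      (PySem.List.pyRange 0 5 1).foldl (fun p j =>
        match pvCellB secret_key_matrix i j with
        | some v =>
          if v = letter1 then (some (i, j), p.2)
          else if v = letter2 then (p.1, some (i, j))
          else p
        | none => p) p) (none, none)
  match ps.1, ps.2 with
  | some p1, some p2 =>
      ((pvCellB secret_key_matrix p1.1 p2.2).getD "",
       (pvCellB secret_key_matrix p2.1 p1.2).getD "")
  | _, _ => ("", "")  -- Python B raises TypeError here (a letter was not found); outside Pre_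

-- ===== PRECONDITION & SPEC =====
-- Pre_ excludes inputs on which A raises (matrix smaller than 5x5, equal letters, or
-- exactly one letter present: indexing with a None column raises TypeError) and the
-- one case where A returns a non-String pair: both letters absent, where A returns
-- (None, None) while B raises TypeError.
def Pre_get_encrypted_or_decrypted_letters_neither_same_row_nor_column (secret_key_matrix : List (List String)) (letter1 : String) (letter2 : String) : Prop :=
  letter1 ≠ letter2 ∧
  5 ≤ secret_key_matrix.length ∧
  (∀ r ∈ secret_key_matrix.take 5, 5 ≤ r.length) ∧
  letter1 ∈ ((secret_key_matrix.take 5).map (fun r => r.take 5)).flatten ∧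
  letter2 ∈ ((secret_key_matrix.take 5).map (fun r => r.take 5)).flatten
instance (secret_key_matrix : List (List String)) (letter1 : String) (letter2 : String) : Decidable (Pre_get_encrypted_or_decrypted_letters_neither_same_row_nor_column secret_key_matrix letter1 letter2) := by unfold Pre_get_encrypted_or_decrypted_letters_neither_same_row_nor_column; infer_instance

def pvWitness_get_encrypted_or_decrypted_letters_neither_same_row_nor_column : List (List String) × String × String :=
  ([["a","b","c","d","e"],["f","g","h","i","j"],["k","l","m","n","o"],["p","q","r","s","t"],["u","v","w","x","y"]], "b", "o")

def Spec_get_encrypted_or_decrypted_letters_neither_same_row_nor_column (secret_key_matrix : List (List String)) (letter1 : String) (letter2 : String) (out : String × String) : Prop := out = get_encrypted_or_decrypted_letters_neither_same_row_nor_column_alt secret_key_matrix letter1 letter2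
instance (secret_key_matrix : List (List String)) (letter1 : String) (letter2 : String) (out : String × String) : Decidable (Spec_get_encrypted_or_decrypted_letters_neither_same_row_nor_column secret_key_matrix letter1 letter2 out) := by unfold Spec_get_encrypted_or_decrypted_letters_neither_same_row_nor_column; infer_instance

-- ===== CLAIM (what is proved, stated in full; the proofs are below) =====
def Claim_equal_get_encrypted_or_decrypted_letters_neither_same_row_nor_column : Prop := ∀ (secret_key_matrix : List (List String)) (letter1 : String) (letter2 : String), Dom_get_encrypted_or_decrypted_letters_neither_same_row_nor_column secret_key_matrix letter1 letter2 → Pre_get_encrypted_or_decrypted_letters_neither_same_row_nor_column secret_key_matrix letter1 letter2 → Spec_get_encrypted_or_decrypted_letters_neither_same_row_nor_column secret_key_matrix letter1 letter2 (get_encrypted_or_decrypted_letters_neither_same_row_nor_column secret_key_matrix letter1 letter2)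

-- ===== LEMMAS AND PROOFS =====

-- the 25 cells of the 5x5 scan, in row-major order
def pvCells : List (Int × Int) :=
  ([0, 1, 2, 3, 4] : List Int).flatMap (fun i => ([0, 1, 2, 3, 4] : List Int).map (fun j => (i, j)))

-- B's single-pass step, flattened over cells
def pvStepB (m : List (List String)) (l1 l2 : String)
    (p : Option (Int × Int) × Option (Int × Int)) (ij : Int × Int) :
    Option (Int × Int) × Option (Int × Int) :=
  match pvCellB m ij.1 ij.2 with
  | some v =>
    if v = l1 then (some (ij.1, ij.2), p.2)
    else if v = l2 then (p.1, some (ij.1, ij.2))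
    else p
  | none => p

-- A's pass-1 step and pass-2 step, flattened over cells
def pvStepA1 (m : List (List String)) (l1 l2 : String)
    (c : Option Int × Option Int) (ij : Int × Int) : Option Int × Option Int :=
  match pvCellA m ij.1 ij.2 with
  | some v =>
    if v = l1 then (some ij.2, c.2)
    else if v = l2 then (c.1, some ij.2)
    else c
  | none => c

def pvStepA2 (m : List (List String)) (l1 l2 : String) (c1 c2 : Option Int)
    (e : Option String × Option String) (ij : Int × Int) : Option String × Option String :=
  match pvCellA m ij.1 ij.2 with
  | some v =>
    if v = l1 then (c2.bind (fun c => pvCellA m ij.1 c), e.2)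
    else if v = l2 then (e.1, c1.bind (fun c => pvCellA m ij.1 c))
    else e
  | none => e

theorem pvNestedFold {α : Type} (f : α → Int → Int → α) (is js : List Int) (s : α) :
    is.foldl (fun s i => js.foldl (fun s j => f s i j) s) s
      = (is.flatMap (fun i => js.map (fun j => (i, j)))).foldl (fun s p => f s p.1 p.2) s := by
  induction is generalizing s with
  | nil => rfl
  | cons i is ih =>
    simp only [List.foldl_cons, List.flatMap_cons, List.foldl_append, List.foldl_map, ih]

theorem pvPass1_eq (m : List (List String)) (l1 l2 : String) :
    ∀ (L : List (Int × Int)) (q : Option (Int × Int) × Option (Int × Int)),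
      L.foldl (pvStepA1 m l1 l2) (q.1.map Prod.snd, q.2.map Prod.snd)
        = ((L.foldl (pvStepB m l1 l2) q).1.map Prod.snd,
           (L.foldl (pvStepB m l1 l2) q).2.map Prod.snd) := by
  intro L
  induction L with
  | nil => intro q; rfl
  | cons ij L ih =>
    intro q
    simp only [List.foldl_cons]
    have : pvStepA1 m l1 l2 (q.1.map Prod.snd, q.2.map Prod.snd) ij
        = ((pvStepB m l1 l2 q ij).1.map Prod.snd, (pvStepB m l1 l2 q ij).2.map Prod.snd) := by
      unfold pvStepA1 pvStepB pvCellA pvCellB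
      cases h : (PySem.List.pyGet? m ij.1).bind (fun row => PySem.List.pyGet? row ij.2) with
      | none => rfl
      | some v =>
        by_cases h1 : v = l1
        · subst h1; simp
        · by_cases h2 : v = l2
          · subst h2; simp [h1]
          · simp [h1, h2]
    rw [this, ih]

theorem pvPass2_char (m : List (List String)) (l1 l2 : String) (c1 c2 : Option Int) :
    ∀ (L : List (Int × Int)) (e : Option String × Option String)
      (q : Option (Int × Int) × Option (Int × Int)),
      e.1 = q.1.bind (fun p => c2.bind (fun c => pvCellA m p.1 c)) →
      e.2 = q.2.bind (fun p => c1.bind (fun c => pvCellA m p.1 c)) →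
      L.foldl (pvStepA2 m l1 l2 c1 c2) e
        = ((L.foldl (pvStepB m l1 l2) q).1.bind (fun p => c2.bind (fun c => pvCellA m p.1 c)),
           (L.foldl (pvStepB m l1 l2) q).2.bind (fun p => c1.bind (fun c => pvCellA m p.1 c))) := by
  intro L
  induction L with
  | nil =>
    intro e q h1 h2
    simp only [List.foldl_nil]
    exact Prod.ext h1 h2
  | cons ij L ih =>
    intro e q h1 h2
    simp only [List.foldl_cons]
    apply ih
    · unfold pvStepA2 pvStepB pvCellA pvCellB
      cases h : (PySem.List.pyGet? m ij.1).bind (fun row => PySem.List.pyGet? row ij.2) with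
      | none => simpa using h1
      | some v =>
        by_cases hv1 : v = l1
        · subst hv1; simp
        · by_cases hv2 : v = l2
          · subst hv2; simp [hv1, h1, pvCellA]
          · simp [hv1, hv2, h1, pvCellA]
    · unfold pvStepA2 pvStepB pvCellA pvCellB
      cases h : (PySem.List.pyGet? m ij.1).bind (fun row => PySem.List.pyGet? row ij.2) with
      | none => simpa [pvCellA] using h2
      | some v =>
        by_cases hv1 : v = l1
        · subst hv1; simp [h2, pvCellA]
        · by_cases hv2 : v = l2
          · subst hv2; simp [hv1]
          · simp [hv1, hv2, h2, pvCellA]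

-- once set, the positions stay set
theorem pvFoldB_fst_isSome (m : List (List String)) (l1 l2 : String) :
    ∀ (L : List (Int × Int)) (q : Option (Int × Int) × Option (Int × Int)),
      q.1.isSome → (L.foldl (pvStepB m l1 l2) q).1.isSome := by
  intro L
  induction L with
  | nil => intro q h; exact h
  | cons ij L ih =>
    intro q h
    apply ih
    unfold pvStepB
    cases hc : pvCellB m ij.1 ij.2 with
    | none => exact h
    | some v =>
      by_cases hv1 : v = l1
      · subst hv1; simp
      · by_cases hv2 : v = l2
        · subst hv2; simp [hv1, h]
        · simp [hv1, hv2, h]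

theorem pvFoldB_snd_isSome (m : List (List String)) (l1 l2 : String) :
    ∀ (L : List (Int × Int)) (q : Option (Int × Int) × Option (Int × Int)),
      q.2.isSome → (L.foldl (pvStepB m l1 l2) q).2.isSome := by
  intro L
  induction L with
  | nil => intro q h; exact h
  | cons ij L ih =>
    intro q h
    apply ih
    unfold pvStepB
    cases hc : pvCellB m ij.1 ij.2 with
    | none => exact h
    | some v =>
      by_cases hv1 : v = l1
      · subst hv1; simp [h]
      · by_cases hv2 : v = l2
        · subst hv2; simp [hv1]
        · simp [hv1, hv2, h]

theorem pvFoldB_fst_found (m : List (List String)) (l1 l2 : String) :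
    ∀ (L : List (Int × Int)) (q : Option (Int × Int) × Option (Int × Int)) (ij : Int × Int),
      ij ∈ L → pvCellB m ij.1 ij.2 = some l1 → (L.foldl (pvStepB m l1 l2) q).1.isSome := by
  intro L
  induction L with
  | nil => intro q ij h; cases h
  | cons kl L ih =>
    intro q ij hmem hcell
    rcases List.mem_cons.mp hmem with h | h
    · subst h
      simp only [List.foldl_cons]
      apply pvFoldB_fst_isSome
      unfold pvStepB
      rw [hcell]; simp
    · exact ih _ _ h hcell

theorem pvFoldB_snd_found (m : List (List String)) (l1 l2 : String) (hne : l1 ≠ l2) :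
    ∀ (L : List (Int × Int)) (q : Option (Int × Int) × Option (Int × Int)) (ij : Int × Int),
      ij ∈ L → pvCellB m ij.1 ij.2 = some l2 → (L.foldl (pvStepB m l1 l2) q).2.isSome := by
  intro L
  induction L with
  | nil => intro q ij h; cases h
  | cons kl L ih =>
    intro q ij hmem hcell
    rcases List.mem_cons.mp hmem with h | h
    · subst h
      simp only [List.foldl_cons]
      apply pvFoldB_snd_isSome
      unfold pvStepB
      rw [hcell]
      simp [Ne.symm hne]
    · exact ih _ _ h hcell

-- membership in the flattened 5x5 block gives a cell of pvCells holding the letter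
theorem pvFind_of_mem (m : List (List String)) (l : String)
    (h : l ∈ ((m.take 5).map (fun r => r.take 5)).flatten) :
    ∃ ij ∈ pvCells, pvCellB m ij.1 ij.2 = some l := by
  rw [List.mem_flatten] at h
  obtain ⟨blk, hblk, hl⟩ := h
  rw [List.mem_map] at hblk
  obtain ⟨r, hr, rfl⟩ := hblk
  obtain ⟨i, hi, hri⟩ := List.mem_iff_getElem.mp hr
  obtain ⟨j, hj, hjv⟩ := List.mem_iff_getElem.mp hl
  simp only [List.length_take] at hi hj
  have hi5 : i < 5 := lt_of_lt_of_le hi (min_le_left _ _)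
  have him : i < m.length := lt_of_lt_of_le hi (min_le_right _ _)
  have hj5 : j < 5 := lt_of_lt_of_le hj (min_le_left _ _)
  have hjr : j < r.length := lt_of_lt_of_le hj (min_le_right _ _)
  have hmi : m[i] = r := by rw [← hri]; exact (List.getElem_take).symm
  have hrj : r[j] = l := by rw [← hjv]; exact (List.getElem_take).symm
  refine ⟨((i : Int), (j : Int)), ?_, ?_⟩
  · unfold pvCells
    simp only [List.mem_flatMap, List.mem_map]
    refine ⟨(i : Int), ?_, (j : Int), ?_, rfl⟩
    · interval_cases i <;> simp
    · interval_cases j <;> simp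
  · have hjm : j < m[i].length := by rw [hmi]; exact hjr
    unfold pvCellB
    simp [List.getElem?_eq_getElem him, List.getElem?_eq_getElem hjm]
    rw [show m[i][j] = r[j] from by congr 1]
    exact hrj

-- pyRange 0 5 1 as a literal
theorem pvRange5 : PySem.List.pyRange 0 5 1 = ([0, 1, 2, 3, 4] : List Int) := by decide

-- ===== VERDICT (by name: the statement is the Claim_ definition above) =====
theorem get_encrypted_or_decrypted_letters_neither_same_row_nor_column_spec : Claim_equal_get_encrypted_or_decrypted_letters_neither_same_row_nor_column := by
  intro m l1 l2 _ hpre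
  obtain ⟨hne, _, _, hm1, hm2⟩ := hpre
  unfold Spec_get_encrypted_or_decrypted_letters_neither_same_row_nor_column
  unfold get_encrypted_or_decrypted_letters_neither_same_row_nor_column
  unfold get_encrypted_or_decrypted_letters_neither_same_row_nor_column_alt
  rw [pvRange5]
  -- flatten B's nested fold
  rw [show ∀ s, (([0,1,2,3,4] : List Int).foldl (fun p i =>
        ([0,1,2,3,4] : List Int).foldl (fun p j =>
          match pvCellB m i j with
          | some v => if v = l1 then (some (i, j), p.2)
                      else if v = l2 then (p.1, some (i, j)) else p
          | none => p) p) s)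
      = pvCells.foldl (pvStepB m l1 l2) s from fun s => pvNestedFold
        (fun p i j => pvStepB m l1 l2 p (i, j)) _ _ s]
  -- flatten A's two nested folds
  rw [show ∀ s, (([0,1,2,3,4] : List Int).foldl (fun c i =>
        ([0,1,2,3,4] : List Int).foldl (fun c j =>
          match pvCellA m i j with
          | some v => if v = l1 then (some j, c.2)
                      else if v = l2 then (c.1, some j) else c
          | none => c) c) s)
      = pvCells.foldl (pvStepA1 m l1 l2) s from fun s => pvNestedFold
        (fun c i j => pvStepA1 m l1 l2 c (i, j)) _ _ s]
  -- the B fold result: both components are set, by the membership hypotheses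
  obtain ⟨ij1, hij1, hc1⟩ := pvFind_of_mem m l1 hm1
  obtain ⟨ij2, hij2, hc2⟩ := pvFind_of_mem m l2 hm2
  set q := pvCells.foldl (pvStepB m l1 l2) ((none : Option (Int × Int)), (none : Option (Int × Int))) with hq
  have hs1 : q.1.isSome := pvFoldB_fst_found m l1 l2 pvCells _ ij1 hij1 hc1
  have hs2 : q.2.isSome := pvFoldB_snd_found m l1 l2 hne pvCells _ ij2 hij2 hc2
  obtain ⟨p1, hp1⟩ := Option.isSome_iff_exists.mp hs1
  obtain ⟨p2, hp2⟩ := Option.isSome_iff_exists.mp hs2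
  -- pass 1 of A equals the column projections of q
  have h1 : pvCells.foldl (pvStepA1 m l1 l2) ((none : Option Int), (none : Option Int))
      = (q.1.map Prod.snd, q.2.map Prod.snd) := by
    have := pvPass1_eq m l1 l2 pvCells ((none : Option (Int × Int)), (none : Option (Int × Int)))
    simpa using this
  rw [h1, hp1, hp2]
  simp only [Option.map_some]
  -- pass 2 of A, flattened and characterized
  rw [show ∀ s, (([0,1,2,3,4] : List Int).foldl (fun e i =>
        ([0,1,2,3,4] : List Int).foldl (fun e j =>
          match pvCellA m i j with
          | some v => if v = l1 then ((some p2.2 : Option Int).bind (fun c => pvCellA m i c), e.2)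
                      else if v = l2 then (e.1, (some p1.2 : Option Int).bind (fun c => pvCellA m i c))
                      else e
          | none => e) e) s)
      = pvCells.foldl (pvStepA2 m l1 l2 (some p1.2) (some p2.2)) s from fun s => pvNestedFold
        (fun e i j => pvStepA2 m l1 l2 (some p1.2) (some p2.2) e (i, j)) _ _ s]
  rw [pvPass2_char m l1 l2 (some p1.2) (some p2.2) pvCells
      ((none : Option String), (none : Option String))
      ((none : Option (Int × Int)), (none : Option (Int × Int))) rfl rfl]
  rw [← hq, hp1, hp2]
  simp [pvCellA, pvCellB]
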